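-- pv_equiv track=rewrite | github.com/liskos/zadanie25osipov | variant_10/22.py | f
-- ===== SOURCE A (Python) =====
-- def f(x):
--     a, b = 0, 1
--     while x > 0:
--         a = a + 1
--         b = b * (x % 7)
--         x = x // 7
--     if a == 3 and b == 24:
--         return True
--     else:
--         return False
-- ===== SOURCE B (Python) =====
-- def f(x):
--     return 49 <= x <= 342 and (x // 49) * ((x // 7) % 7) * (x % 7) == 24
-- ===== Notes on version B (the rewrite author's own statement) =====
-- stated objective: simpler
-- what changed: Replaces the digit-extraction while-loop and its two accumulators with a closed form: 'exactly 3 base-7 digits' is the range test 49 <= x <= 342, and the three digits are read off directly as x//49, (x//7)%7, x%7.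
import Mathlib
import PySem

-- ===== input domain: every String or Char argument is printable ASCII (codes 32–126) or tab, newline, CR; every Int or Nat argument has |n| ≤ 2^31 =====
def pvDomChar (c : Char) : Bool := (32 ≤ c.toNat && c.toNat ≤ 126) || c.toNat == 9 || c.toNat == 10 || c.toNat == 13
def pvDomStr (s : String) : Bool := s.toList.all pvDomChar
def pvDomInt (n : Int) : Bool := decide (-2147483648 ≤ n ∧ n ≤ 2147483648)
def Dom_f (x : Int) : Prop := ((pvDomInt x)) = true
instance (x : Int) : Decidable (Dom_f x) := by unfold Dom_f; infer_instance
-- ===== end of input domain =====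

-- B replaces A's digit-extraction loop with a closed-form range test plus direct digit arithmetic (simpler).

-- ===== PORT A =====
-- literal port of A's while loop over state (x, a, b)
def fLoop (x a b : Int) : Int × Int :=
  if x > 0 then
    fLoop (PySem.Int.floordiv x 7) (a + 1) (b * PySem.Int.mod x 7)
  else (a, b)
termination_by x.toNat
decreasing_by
  simp only [PySem.Int.floordiv_eq_ediv_of_pos (by omega : (0:Int) < 7)]
  omega

def f (x : Int) : Bool :=
  let ab := fLoop x 0 1
  if ab.1 = 3 ∧ ab.2 = 24 then true else false

-- ===== PORT B =====
def f_alt (x : Int) : Bool :=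
  decide (49 ≤ x ∧ x ≤ 342) &&
    decide (PySem.Int.floordiv x 49 * PySem.Int.mod (PySem.Int.floordiv x 7) 7 * PySem.Int.mod x 7 = 24)

-- ===== PRECONDITION & SPEC =====
def Spec_f (x : Int) (out : Bool) : Prop := out = f_alt x
instance (x : Int) (out : Bool) : Decidable (Spec_f x out) := by unfold Spec_f; infer_instance

-- ===== CLAIM (what is proved, stated in full; the proofs are below) =====
def Claim_equal_f : Prop := ∀ (x : Int), Dom_f x → Spec_f x (f x)

-- ===== LEMMAS AND PROOFS =====

theorem fLoop_pos (x a b : Int) (h : 0 < x) :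
    fLoop x a b = fLoop (x / 7) (a + 1) (b * (x % 7)) := by
  rw [fLoop]
  simp [h]

theorem fLoop_stop (x a b : Int) (h : ¬ 0 < x) : fLoop x a b = (a, b) := by
  rw [fLoop]; simp [h]

-- the digit counter only grows: one more digit for every positive x
theorem fLoop_fst_ge (x a b : Int) (h : 0 < x) : a + 1 ≤ (fLoop x a b).1 := by
  by_cases h7 : 0 < x / 7
  · have := fLoop_fst_ge (x / 7) (a + 1) (b * (x % 7)) h7
    rw [fLoop_pos x a b h]
    omega
  · rw [fLoop_pos x a b h, fLoop_stop _ _ _ h7]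
termination_by x.toNat
decreasing_by omega

-- ===== VERDICT (by name: the statement is the Claim_ definition above) =====
theorem f_spec : Claim_equal_f := by
  intro x _
  unfold Spec_f f f_alt
  by_cases h0 : 0 < x
  · by_cases h343 : x ≤ 342
    · -- at most three digits: unfold the loop fully
      rw [fLoop_pos _ _ _ h0]
      by_cases h7 : 0 < x / 7
      · rw [fLoop_pos _ _ _ h7]
        by_cases h49 : 0 < x / 7 / 7
        · rw [fLoop_pos _ _ _ h49]
          have hstop : ¬ 0 < x / 7 / 7 / 7 := by omega
          rw [fLoop_stop _ _ _ hstop]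
          have h1 : PySem.Int.floordiv x 49 = x / 49 :=
            PySem.Int.floordiv_eq_ediv_of_pos (by omega)
          have h2 : PySem.Int.floordiv x 7 = x / 7 :=
            PySem.Int.floordiv_eq_ediv_of_pos (by omega)
          have h3 : ∀ y : Int, PySem.Int.mod y 7 = y % 7 := fun y =>
            PySem.Int.mod_eq_emod_of_pos (by omega)
          have h4 : x / 7 / 7 = x / 49 := by omega
          have h5 : (x / 49) % 7 = x / 49 := by omega
          have hr : 49 ≤ x ∧ x ≤ 342 := by omega
          have hc : x % 7 * (x / 7 % 7) * (x / 49) = x / 49 * (x / 7 % 7) * (x % 7) := by ring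
          simp only [h1, h2, h3, h4, h5, hr, one_mul, hc]
          by_cases hp : x / 49 * (x / 7 % 7) * (x % 7) = 24
          · simp [hp]
          · simp [hp]
        · -- two digits
          rw [fLoop_stop _ _ _ h49]
          have : ¬ (49 ≤ x ∧ x ≤ 342) := by omega
          simp [this]
      · -- one digit
        rw [fLoop_stop _ _ _ h7]
        have : ¬ (49 ≤ x ∧ x ≤ 342) := by omega
        simp [this]
    · -- four or more digits: the counter exceeds 3
      rw [fLoop_pos _ _ _ h0, fLoop_pos _ _ _ (by omega : 0 < x / 7),
          fLoop_pos _ _ _ (by omega : 0 < x / 7 / 7)]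
      have h4 : 0 < x / 7 / 7 / 7 := by omega
      have hge := fLoop_fst_ge (x / 7 / 7 / 7) 3
        (x % 7 * (x / 7 % 7) * (x / 7 / 7 % 7)) h4
      have hne : ¬ (49 ≤ x ∧ x ≤ 342) := by omega
      simp only [hne, one_mul, decide_false, Bool.false_and]
      have hne3 : (fLoop (x / 7 / 7 / 7) 3 (x % 7 * (x / 7 % 7) * (x / 7 / 7 % 7))).1 ≠ 3 := by
        omega
      simp [hne3]
  · -- x ≤ 0: loop never runs
    rw [fLoop_stop _ _ _ h0]
    have : ¬ (49 ≤ x ∧ x ≤ 342) := by omega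
    simp [this]
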